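-- pv_equiv track=rewrite | github.com/LuizCBB/pep_anticancer | streamlit_app.py | build_kmers
-- ===== SOURCE A (Python) =====
-- alphabet = ['G', 'I', 'V', 'F', 'Y', 'W', 'A', 'L', 'M', 'E', 'Q',
--             'R', 'K', 'P', 'N', 'D', 'H', 'S', 'T', 'C']
--
-- ksize = 1
--
-- def build_kmers(sequence):
--         sequence = clear_sequence(sequence)
--         kmers = []
--         n_kmers = len(sequence) - ksize + 1
--
--         for i in range(n_kmers):
--             kmer = sequence[i:i + ksize]
--             kmers.append(kmer)
--
--         return kmers
--
-- def clear_sequence(sequence):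
--     sequence = sequence.upper()
--     clear_seq = ""
--     for i in sequence:
--         if i in alphabet:
--             clear_seq += i
--     return clear_seq
-- ===== SOURCE B (Python) =====
-- alphabet = ['G', 'I', 'V', 'F', 'Y', 'W', 'A', 'L', 'M', 'E', 'Q',
--             'R', 'K', 'P', 'N', 'D', 'H', 'S', 'T', 'C']
--
-- ksize = 1
--
-- def build_kmers(sequence):
--     # single pass: filter while iterating, no intermediate cleared string
--     return [c for c in sequence.upper() if c in alphabet]
-- ===== Notes on version B (the rewrite author's own statement) =====
-- stated objective: simpler
-- what changed: B does one pass: a comprehension over sequence.upper() that keeps alphabet characters as one-char strings, eliminating A's intermediate cleared string and its second slicing loop over range(len-ksize+1).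
import Mathlib
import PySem

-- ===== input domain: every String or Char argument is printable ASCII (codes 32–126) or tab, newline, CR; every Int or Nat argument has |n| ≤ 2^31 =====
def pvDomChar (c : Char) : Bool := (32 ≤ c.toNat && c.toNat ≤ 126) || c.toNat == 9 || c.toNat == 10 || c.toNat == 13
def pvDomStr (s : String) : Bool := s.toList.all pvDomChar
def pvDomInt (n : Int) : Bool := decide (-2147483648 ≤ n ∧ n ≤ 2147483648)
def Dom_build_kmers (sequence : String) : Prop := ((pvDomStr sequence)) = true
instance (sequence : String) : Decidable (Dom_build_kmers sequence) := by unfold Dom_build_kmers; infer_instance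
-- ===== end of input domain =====

-- B replaces A's two passes (build a cleared string, then slice it into 1-char kmers)
-- by a single filtering pass producing the one-char strings directly (simpler).

-- ===== PORT A =====
-- module-level constant `alphabet` (Python list of 1-char strings; membership of a
-- 1-char string is exactly membership of its character, so it is a List Char here)
def pvAlphabet : List Char :=
  ['G', 'I', 'V', 'F', 'Y', 'W', 'A', 'L', 'M', 'E', 'Q',
   'R', 'K', 'P', 'N', 'D', 'H', 'S', 'T', 'C']

-- clear_sequence: upper-case, then accumulate the kept characters (clear_seq += i)
def clear_sequence (sequence : String) : String :=
  String.ofList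
    ((PySem.Str.upper sequence).toList.foldl
      (fun acc c => if pvAlphabet.contains c then acc ++ [c] else acc) [])

def build_kmers (sequence : String) : List String :=
  let s := clear_sequence sequence
  let n_kmers : Int := (PySem.Str.len s) - 1 + 1
  (PySem.List.pyRange 0 n_kmers 1).foldl
    (fun kmers i => kmers ++ [PySem.Str.slice s (some i) (some (i + 1))]) []

-- ===== PORT B =====
def build_kmers_alt (sequence : String) : List String :=
  (((PySem.Str.upper sequence).toList.filter (fun c => pvAlphabet.contains c)).map
    (fun c => String.ofList [c]))

-- ===== PRECONDITION & SPEC =====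
def Spec_build_kmers (sequence : String) (out : List String) : Prop := out = build_kmers_alt sequence
instance (sequence : String) (out : List String) : Decidable (Spec_build_kmers sequence out) := by unfold Spec_build_kmers; infer_instance

-- ===== CLAIM (what is proved, stated in full; the proofs are below) =====
def Claim_equal_build_kmers : Prop := ∀ (sequence : String), Dom_build_kmers sequence → Spec_build_kmers sequence (build_kmers sequence)

-- ===== LEMMAS AND PROOFS =====

-- slicing a string of length n into its 1-char pieces gives its characters as singletons
theorem pv_slices_eq_singletons (l : List Char) :
    (PySem.List.pyRange 0 (l.length : Int) 1).map
      (fun i => PySem.Str.slice (String.ofList l) (some i) (some (i + 1)))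
    = l.map (fun c => String.ofList [c]) := by
  rw [PySem.List.pyRange_one]
  simp only [Int.sub_zero, Int.toNat_natCast, List.map_map]
  apply List.ext_getElem (by simp)
  intro k h1 h2
  simp only [List.getElem_map, List.getElem_range, Function.comp_apply]
  have hk : k < l.length := by simpa using h2
  apply String.toList_inj.mp
  rw [show ((0 : Int) + (k : Int)) = ((k : Nat) : Int) by ring]
  rw [show ((k : Int) + 1) = (((k + 1 : Nat)) : Int) by push_cast; ring]
  simp only [PySem.Str.toList_slice, String.toList_ofList, PySem.Chars.slice_eq_listSlice]
  rw [PySem.List.slice_natCast, show k + 1 - k = 1 by omega,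
     List.drop_eq_getElem_cons hk, List.take_succ_cons, List.take_zero]

-- ===== VERDICT (by name: the statement is the Claim_ definition above) =====
theorem build_kmers_spec : Claim_equal_build_kmers := by
  intro sequence _
  unfold Spec_build_kmers build_kmers build_kmers_alt clear_sequence
  rw [PySem.List.foldl_append_if_eq_filter]
  set l := (PySem.Str.upper sequence).toList.filter (fun c => pvAlphabet.contains c) with hl
  simp only [List.nil_append, PySem.Str.len_eq]
  rw [PySem.List.foldl_append_singleton_eq_map, List.nil_append]
  have hn : ((String.ofList l).toList.length : Int) - 1 + 1 = (l.length : Int) := by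
    simp
  rw [hn]
  exact pv_slices_eq_singletons l
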